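-- pv_equiv track=rewrite | github.com/oernster/crankthecode | app/domain/tags.py | extract_layer_slugs_from_tags
-- ===== SOURCE A (Python) =====
-- def normalize_layer_slug(raw_slug: str) -> str:
--     """Normalize a `layer:` slug into kebab-case."""
--
--     raw = (raw_slug or "").strip().lower()
--     if not raw:
--         return ""
--
--     if (
--         raw.replace("-", "").isalnum()
--         and "--" not in raw
--         and not raw.startswith("-")
--         and not raw.endswith("-")
--     ):
--         return raw
--
--     out_chars: list[str] = []
--     prev_dash = False
--     for ch in raw:
--         if ch.isalnum():
--             out_chars.append(ch)
--             prev_dash = False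
--             continue
--         if ch in {" ", "_", "-"}:
--             if not prev_dash and out_chars:
--                 out_chars.append("-")
--                 prev_dash = True
--             continue
--
--     return "".join(out_chars).strip("-")
--
-- def extract_layer_slugs_from_tags(tags: list[str]) -> set[str]:
--     """Extract normalized `layer:` slugs from a post's tag list."""
--
--     out: set[str] = set()
--     for t in tags or []:
--         raw = (t or "").strip()
--         if not raw:
--             continue
--         if not raw.lower().startswith("layer:"):
--             continue
--         tail = raw.split(":", 1)[1].strip()
--         slug = normalize_layer_slug(tail)
--         if slug:
--             out.add(slug)
--     return out
-- ===== SOURCE B (Python) =====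
-- def normalize_layer_slug(raw_slug: str) -> str:
--     """Normalize a `layer:` slug into kebab-case (clean, split, join)."""
--     s = (raw_slug or "").strip().lower()
--     cleaned = "".join(
--         ch if ch.isalnum() else (" " if ch in " _-" else "") for ch in s
--     )
--     return "-".join(cleaned.split())
--
--
-- def extract_layer_slugs_from_tags(tags: list[str]) -> set[str]:
--     """Extract normalized `layer:` slugs from a post's tag list."""
--     out = {
--         normalize_layer_slug(t.strip().split(":", 1)[1].strip())
--         for t in (tags or [])
--         if t.strip().lower().startswith("layer:")
--     }
--     out.discard("")
--     return out
-- ===== Notes on version B (the rewrite author's own statement) =====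
-- stated objective: simpler
-- what changed: normalize_layer_slug's fast-path guard and the prev_dash state machine are replaced by a clean/split/join pipeline (keep alnum chars, map ' _-' to a space, drop the rest, then split on whitespace and join with '-'), and the outer loop becomes a set comprehension followed by discarding the empty slug.
import Mathlib
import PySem

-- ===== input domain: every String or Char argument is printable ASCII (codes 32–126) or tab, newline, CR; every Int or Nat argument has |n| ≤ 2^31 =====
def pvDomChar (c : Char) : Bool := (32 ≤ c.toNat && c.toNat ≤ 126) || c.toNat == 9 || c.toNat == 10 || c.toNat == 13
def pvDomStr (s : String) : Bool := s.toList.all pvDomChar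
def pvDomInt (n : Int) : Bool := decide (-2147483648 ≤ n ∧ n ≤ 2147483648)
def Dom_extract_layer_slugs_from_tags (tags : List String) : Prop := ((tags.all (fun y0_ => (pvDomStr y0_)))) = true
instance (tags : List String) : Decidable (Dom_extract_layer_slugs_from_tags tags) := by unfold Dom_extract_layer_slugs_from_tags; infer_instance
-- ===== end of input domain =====

-- B replaces A's fast-path guard and prev_dash state machine by a clean/split/join
-- pipeline and builds the set by a comprehension plus discard("") — objective: simpler.
-- Python A returns a set; per the type convention both ports return its elements in
-- first-insertion order as a List String.

-- ===== PORT A =====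

-- the body of A's `for ch in raw` loop (state: (out_chars, prev_dash))
def pyStep (st : List Char × Bool) (ch : Char) : List Char × Bool :=
  if PySem.Chars.isalnum ch then (st.1 ++ [ch], false)
  else if ch == ' ' || ch == '_' || ch == '-' then
    (if !st.2 && !st.1.isEmpty then (st.1 ++ ['-'], true) else st)
  else st

def pyNormalizeLayerSlug (raw_slug : String) : String :=
  let raw := PySem.Chars.lower (PySem.Chars.strip raw_slug.toList)
  if raw.isEmpty then ""
  else if PySem.Chars.strIsalnum (PySem.Chars.replace raw ['-'] [])
        && !PySem.Chars.isIn ['-', '-'] raw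
        && !PySem.Chars.startswith raw ['-']
        && !PySem.Chars.endswith raw ['-'] then String.ofList raw
  else String.ofList (PySem.Chars.stripChars (raw.foldl pyStep ([], false)).1 ['-'])

def extract_layer_slugs_from_tags (tags : List String) : List String :=
  tags.foldl (fun (out : PySem.Set String) t =>
    let raw := PySem.Chars.strip t.toList
    if raw.isEmpty then out
    else if !PySem.Chars.startswith (PySem.Chars.lower raw) ['l', 'a', 'y', 'e', 'r', ':'] then out
    else
      -- raw.split(":", 1)[1]: the startswith guard ensures a ':' occurs, so index 1 exists
      let tail := PySem.Chars.strip ((PySem.Chars.splitOnMax raw [':'] 1).getD 1 [])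
      let slug := pyNormalizeLayerSlug (String.ofList tail)
      if slug == "" then out else PySem.Set.add out slug) []

-- ===== PORT B =====

-- per-character cleaning of B's generator expression: keep alnum, ' _-' → space, else drop
def altClean (ch : Char) : List Char :=
  if PySem.Chars.isalnum ch then [ch]
  else if ch == ' ' || ch == '_' || ch == '-' then [' ']
  else []

def altNormalizeLayerSlug (raw_slug : String) : String :=
  let s := PySem.Chars.lower (PySem.Chars.strip raw_slug.toList)
  String.ofList (PySem.Chars.join ['-'] (PySem.Chars.split₀ (s.flatMap altClean)))

def extract_layer_slugs_from_tags_alt (tags : List String) : List String :=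
  let out := PySem.Set.ofList
    ((tags.filter (fun t =>
        PySem.Chars.startswith (PySem.Chars.lower (PySem.Chars.strip t.toList))
          ['l', 'a', 'y', 'e', 'r', ':'])).map (fun t =>
      altNormalizeLayerSlug (String.ofList (PySem.Chars.strip
        ((PySem.Chars.splitOnMax (PySem.Chars.strip t.toList) [':'] 1).getD 1 [])))))
  PySem.Set.discard out ""

-- ===== PRECONDITION & SPEC =====
def Spec_extract_layer_slugs_from_tags (tags : List String) (out : List String) : Prop := out = extract_layer_slugs_from_tags_alt tags
instance (tags : List String) (out : List String) : Decidable (Spec_extract_layer_slugs_from_tags tags out) := by unfold Spec_extract_layer_slugs_from_tags; infer_instance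

-- ===== CLAIM (what is proved, stated in full; the proofs are below) =====
def Claim_equal_extract_layer_slugs_from_tags : Prop := ∀ (tags : List String), Dom_extract_layer_slugs_from_tags tags → Spec_extract_layer_slugs_from_tags tags (extract_layer_slugs_from_tags tags)

-- ===== LEMMAS AND PROOFS =====

-- character-class facts
theorem alnum_not_space (c : Char) (h : PySem.Chars.isalnum c = true) :
    PySem.Chars.isspace c = false := by
  simp only [PySem.Chars.isalnum, PySem.Chars.isalpha, PySem.Chars.isupper, PySem.Chars.islower,
    PySem.Chars.isdigit, Bool.or_eq_true, Bool.and_eq_true, decide_eq_true_eq, Char.le_def] at h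
  simp only [PySem.Chars.isspace, Char.toNat] at *
  simp only [Bool.or_eq_false_iff, Bool.and_eq_false_iff, decide_eq_false_iff_not]
  have eA : ('A').val.toNat = 65 := by decide
  have eZ : ('Z').val.toNat = 90 := by decide
  have ea : ('a').val.toNat = 97 := by decide
  have ez : ('z').val.toNat = 122 := by decide
  have e0 : ('0').val.toNat = 48 := by decide
  have e9 : ('9').val.toNat = 57 := by decide
  rcases h with (⟨h1, h2⟩ | ⟨h1, h2⟩) | ⟨h1, h2⟩ <;>
    · have u1 := UInt32.le_iff_toNat_le.mp h1
      have u2 := UInt32.le_iff_toNat_le.mp h2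
      omega

theorem alnum_ne_dash (c : Char) (h : PySem.Chars.isalnum c = true) : ¬ c = '-' := by
  intro e; subst e; exact absurd h (by decide)

theorem dropWhile_dash_cons_alnum (d : Char) (hda : PySem.Chars.isalnum d = true)
    (X : List Char) :
    List.dropWhile (fun c => List.contains ['-'] c) (d :: X) = d :: X := by
  rw [List.dropWhile_cons]
  simp [alnum_ne_dash d hda]

theorem dropWhile_dash_dash (X : List Char) :
    List.dropWhile (fun c => List.contains ['-'] c) ('-' :: X)
      = List.dropWhile (fun c => List.contains ['-'] c) X := by
  rw [List.dropWhile_cons]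
  simp

-- replace(s, "-", "") is the dash filter
theorem replace_dash_go (fuel : Nat) :
    ∀ (l : List Char) (acc : List Char), l.length ≤ fuel →
      PySem.Chars.replace.go ['-'] [] fuel l acc
        = acc.reverse ++ l.filter (fun c => !(c == '-')) := by
  induction fuel with
  | zero =>
    intro l acc hl
    have : l = [] := List.length_eq_zero_iff.mp (Nat.le_zero.mp hl)
    subst this; simp [PySem.Chars.replace.go]
  | succ n ih =>
    intro l acc hl
    cases l with
    | nil => simp [PySem.Chars.replace.go]
    | cons c t =>
      by_cases hc : c = '-'
      · subst hc
        rw [show PySem.Chars.replace.go ['-'] [] (n + 1) ('-' :: t) acc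
              = PySem.Chars.replace.go ['-'] [] n t acc by
            simp [PySem.Chars.replace.go, List.isPrefixOf]]
        rw [ih t acc (by simpa using Nat.le_of_succ_le_succ hl)]
        simp
      · rw [show PySem.Chars.replace.go ['-'] [] (n + 1) (c :: t) acc
              = PySem.Chars.replace.go ['-'] [] n t (c :: acc) by
            simp [PySem.Chars.replace.go, List.isPrefixOf, Ne.symm hc]]
        rw [ih t (c :: acc) (by simpa using Nat.le_of_succ_le_succ hl)]
        simp [hc]

theorem replace_dash (s : List Char) :
    PySem.Chars.replace s ['-'] [] = s.filter (fun c => !(c == '-')) := by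
  rw [show PySem.Chars.replace s ['-'] [] = PySem.Chars.replace.go ['-'] [] s.length s [] by
    simp [PySem.Chars.replace]]
  simpa using replace_dash_go s.length s [] le_rfl

-- intercalate equations
theorem ic_nil (s : List Char) : List.intercalate s ([] : List (List Char)) = [] := by
  simp [List.intercalate]

theorem ic_single (s w : List Char) : List.intercalate s [w] = w := by
  simp [List.intercalate]

theorem ic_cons_cons (s w v : List Char) (ws : List (List Char)) :
    List.intercalate s (w :: v :: ws) = w ++ s ++ List.intercalate s (v :: ws) := by
  simp [List.intercalate, List.intersperse]

theorem ic_concat (s w : List Char) (ws : List (List Char)) :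
    List.intercalate s (ws ++ [w])
      = if ws = [] then w else List.intercalate s ws ++ s ++ w := by
  induction ws with
  | nil => simp [ic_single]
  | cons v ws ih =>
    cases ws with
    | nil => simp [ic_cons_cons, ic_single]
    | cons u ws' =>
      simp only [List.cons_append]
      rw [ic_cons_cons s v u (ws' ++ [w]),
        show u :: (ws' ++ [w]) = (u :: ws') ++ [w] from rfl, ih]
      simp [ic_cons_cons s v u ws', List.append_assoc]

theorem ic_snoc_char (w : List Char) (c : Char) (ws : List (List Char)) :
    List.intercalate ['-'] (ws ++ [w ++ [c]])
      = List.intercalate ['-'] (ws ++ [w]) ++ [c] := by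
  rw [ic_concat, ic_concat]
  by_cases h : ws = [] <;> simp [h]

theorem ic_ne_nil (ws : List (List Char)) (H : ∀ w ∈ ws, w ≠ []) (h : ws ≠ []) :
    List.intercalate ['-'] ws ≠ [] := by
  cases ws with
  | nil => exact absurd rfl h
  | cons w ws' =>
    cases ws' with
    | nil => simpa [ic_single] using H w (by simp)
    | cons v ws'' =>
      rw [ic_cons_cons]
      have := H w (by simp)
      simp [List.append_eq_nil_iff, this]

theorem ic_head (c : Char) (w' : List Char) (ws' : List (List Char)) :
    ∃ r, List.intercalate ['-'] ((c :: w') :: ws') = c :: r := by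
  cases ws' with
  | nil => exact ⟨w', ic_single _ _⟩
  | cons v ws'' =>
    refine ⟨w' ++ ['-'] ++ List.intercalate ['-'] (v :: ws''), ?_⟩
    rw [ic_cons_cons]; simp

-- the word lists reaching the joins: nonempty, all-alnum words
def GoodWords (ws : List (List Char)) : Prop :=
  ∀ w ∈ ws, w ≠ [] ∧ w.all PySem.Chars.isalnum = true

theorem ic_dropWhile_rev (ws : List (List Char)) (H : GoodWords ws) :
    List.dropWhile (fun c => List.contains ['-'] c) (List.intercalate ['-'] ws).reverse
      = (List.intercalate ['-'] ws).reverse := by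
  rcases List.eq_nil_or_concat' ws with rfl | ⟨ws₂, w, rfl⟩
  · simp [ic_nil]
  · obtain ⟨hne, hal⟩ := H w (by simp)
    cases hw : w.reverse with
    | nil => exact absurd (by simpa using hw) hne
    | cons d t =>
      have hd : d ∈ w := by
        have : d ∈ w.reverse := by rw [hw]; simp
        simpa using this
      have hda : PySem.Chars.isalnum d = true := by
        rw [List.all_eq_true] at hal; exact hal d hd
      by_cases h2 : ws₂ = []
      · subst h2
        simp only [List.nil_append, ic_single]
        rw [hw]
        exact dropWhile_dash_cons_alnum d hda t
      · have hICr : (List.intercalate ['-'] (ws₂ ++ [w])).reverse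
            = d :: (t ++ ('-' :: (List.intercalate ['-'] ws₂).reverse)) := by
          rw [ic_concat]
          simp [h2, List.reverse_append, hw]
        rw [hICr]
        exact dropWhile_dash_cons_alnum d hda _

theorem strip_out (ws : List (List Char)) (pd : Bool) (H : GoodWords ws)
    (hpd : pd = true → ws ≠ []) :
    PySem.Chars.stripChars (List.intercalate ['-'] ws ++ (if pd then ['-'] else [])) ['-']
      = List.intercalate ['-'] ws := by
  simp only [PySem.Chars.stripChars]
  cases ws with
  | nil =>
    cases pd with
    | false => simp [ic_nil]
    | true => exact absurd rfl (hpd rfl)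
  | cons w ws' =>
    obtain ⟨hne, hal⟩ := H w (by simp)
    cases w with
    | nil => exact absurd rfl hne
    | cons c w' =>
      have hc : PySem.Chars.isalnum c = true := by
        simp only [List.all_cons, Bool.and_eq_true] at hal; exact hal.1
      obtain ⟨r, hr⟩ := ic_head c w' ws'
      cases pd with
      | false =>
        rw [show (if (false : Bool) = true then ['-'] else ([] : List Char)) = [] from rfl,
          List.append_nil, hr]
        rw [dropWhile_dash_cons_alnum c hc r]
        rw [← hr, ic_dropWhile_rev _ H, List.reverse_reverse]
      | true =>
        rw [show (if (true : Bool) = true then ['-'] else ([] : List Char)) = ['-'] from rfl, hr]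
        rw [show (c :: r) ++ ['-'] = c :: (r ++ ['-']) from by simp]
        rw [dropWhile_dash_cons_alnum c hc (r ++ ['-'])]
        rw [show (c :: (r ++ ['-'])).reverse = '-' :: (c :: r).reverse from by simp]
        rw [dropWhile_dash_dash]
        rw [← hr, ic_dropWhile_rev _ H, List.reverse_reverse]

-- A-loop state rendered as a string: completed words (reversed), current word (reversed), prev_dash
def OutOf (acc : List (List Char)) (cur : List Char) (pd : Bool) : List Char :=
  List.intercalate ['-'] (acc.reverse ++ if cur.isEmpty then [] else [cur.reverse])
    ++ (if pd then ['-'] else [])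

def SlugInv (acc : List (List Char)) (cur : List Char) (pd : Bool) : Prop :=
  GoodWords acc ∧ cur.all PySem.Chars.isalnum = true ∧
    (cur = [] → ((acc = [] ∧ pd = false) ∨ (pd = true ∧ acc ≠ []))) ∧
    (cur ≠ [] → pd = false)

theorem isEmpty_false_of_ne {l : List Char} (h : l ≠ []) : l.isEmpty = false := by
  simpa [List.isEmpty_iff] using h

theorem outOf_nil_cur (acc : List (List Char)) (pd : Bool) :
    OutOf acc [] pd = List.intercalate ['-'] acc.reverse ++ (if pd then ['-'] else []) := by
  simp [OutOf]

theorem outOf_ne (acc : List (List Char)) (cur : List Char) (pd : Bool) (hcn : cur ≠ []) :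
    OutOf acc cur pd
      = List.intercalate ['-'] (acc.reverse ++ [cur.reverse]) ++ (if pd then ['-'] else []) := by
  simp [OutOf, isEmpty_false_of_ne hcn]

theorem inv_words (acc : List (List Char)) (cur : List Char) (pd : Bool)
    (h : SlugInv acc cur pd) :
    GoodWords (acc.reverse ++ if cur.isEmpty then [] else [cur.reverse]) := by
  obtain ⟨hacc, hcur, _, _⟩ := h
  intro w hw
  rcases List.mem_append.mp hw with hw | hw
  · exact hacc w (List.mem_reverse.mp hw)
  · by_cases hc : cur.isEmpty
    · simp [hc] at hw
    · simp only [hc, Bool.false_eq_true, if_neg, not_false_iff, List.mem_singleton] at hw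
      subst hw
      refine ⟨by simpa [List.isEmpty_iff] using hc, ?_⟩
      rw [List.all_eq_true] at hcur ⊢
      intro x hx; exact hcur x (by simpa using hx)

theorem out_snoc (acc : List (List Char)) (cur : List Char) (pd : Bool)
    (h : SlugInv acc cur pd) (c : Char) :
    OutOf acc cur pd ++ [c] = OutOf acc (c :: cur) false := by
  obtain ⟨hacc, hcur, hc0, hc1⟩ := h
  rw [outOf_ne acc (c :: cur) false (by simp),
    show (if (false : Bool) = true then ['-'] else ([] : List Char)) = [] from rfl,
    List.append_nil, show (c :: cur).reverse = cur.reverse ++ [c] from by simp, ic_snoc_char]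
  by_cases hcn : cur = []
  · subst hcn
    rcases hc0 rfl with ⟨rfl, rfl⟩ | ⟨rfl, haccne⟩
    · simp [outOf_nil_cur, ic_nil, ic_single]
    · rw [outOf_nil_cur,
        show (if (true : Bool) = true then ['-'] else ([] : List Char)) = ['-'] from rfl]
      rw [show List.reverse ([] : List Char) = [] from rfl, ic_concat]
      have : acc.reverse ≠ [] := by simpa using haccne
      simp [this]
  · have := hc1 hcn; subst this
    rw [outOf_ne acc cur false hcn]
    simp

-- the engine: A's loop + strip("-") computes B's split-and-join, for any aligned state
theorem main_loop (rest : List Char) :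
    ∀ acc cur pd, SlugInv acc cur pd →
      PySem.Chars.stripChars (rest.foldl pyStep (OutOf acc cur pd, pd)).1 ['-']
        = List.intercalate ['-'] (PySem.Chars.split₀.go (rest.flatMap altClean) cur acc) := by
  induction rest with
  | nil =>
    intro acc cur pd hinv
    simp only [List.foldl_nil, List.flatMap_nil]
    have hgw := inv_words acc cur pd hinv
    obtain ⟨hacc, hcur, hc0, hc1⟩ := hinv
    have hgo : PySem.Chars.split₀.go ([] : List Char) cur acc
        = acc.reverse ++ if cur.isEmpty then [] else [cur.reverse] := by
      by_cases hcn : cur = []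
      · subst hcn; simp [PySem.Chars.split₀.go]
      · simp [PySem.Chars.split₀.go, isEmpty_false_of_ne hcn]
    rw [hgo]
    unfold OutOf
    apply strip_out _ pd hgw
    intro hpd
    subst hpd
    have hcn : cur = [] := by
      by_contra hne
      exact absurd (hc1 hne) (by simp)
    subst hcn
    rcases hc0 rfl with ⟨_, h⟩ | ⟨_, haccne⟩
    · exact absurd h (by simp)
    · simpa using haccne
  | cons c rest ih =>
    intro acc cur pd hinv
    have hinv' := hinv
    obtain ⟨hacc, hcur, hc0, hc1⟩ := hinv'
    simp only [List.foldl_cons, List.flatMap_cons]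
    by_cases ha : PySem.Chars.isalnum c = true
    · rw [show altClean c = [c] by simp [altClean, ha]]
      rw [show pyStep (OutOf acc cur pd, pd) c = (OutOf acc cur pd ++ [c], false) by
        simp [pyStep, ha]]
      rw [out_snoc acc cur pd hinv c]
      rw [show PySem.Chars.split₀.go ([c] ++ rest.flatMap altClean) cur acc
            = PySem.Chars.split₀.go (rest.flatMap altClean) (c :: cur) acc by
          simp [PySem.Chars.split₀.go, alnum_not_space c ha]]
      exact ih acc (c :: cur) false ⟨hacc, by simp [ha, hcur], by simp, fun _ => rfl⟩
    · have ha' : PySem.Chars.isalnum c = false := by simpa using ha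
      by_cases hs : (c == ' ' || c == '_' || c == '-') = true
      · rw [show altClean c = [' '] by simp [altClean, ha', hs]]
        rw [show PySem.Chars.split₀.go ([' '] ++ rest.flatMap altClean) cur acc
              = if cur.isEmpty then PySem.Chars.split₀.go (rest.flatMap altClean) [] acc
                else PySem.Chars.split₀.go (rest.flatMap altClean) [] (cur.reverse :: acc) by
            simp [PySem.Chars.split₀.go, show PySem.Chars.isspace ' ' = true by decide]]
        by_cases hcn : cur = []
        · subst hcn
          rw [show (if ([] : List Char).isEmpty = true
                then PySem.Chars.split₀.go (rest.flatMap altClean) [] acc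
                else PySem.Chars.split₀.go (rest.flatMap altClean) []
                  (List.reverse ([] : List Char) :: acc))
              = PySem.Chars.split₀.go (rest.flatMap altClean) [] acc from rfl]
          rcases hc0 rfl with ⟨rfl, rfl⟩ | ⟨rfl, haccne⟩
          · rw [show pyStep (OutOf [] [] false, false) c = (OutOf [] [] false, false) by
              simp [pyStep, ha', hs, OutOf, ic_nil]]
            exact ih [] [] false ⟨hacc, rfl, fun _ => Or.inl ⟨rfl, rfl⟩, by simp⟩
          · rw [show pyStep (OutOf acc [] true, true) c = (OutOf acc [] true, true) by
              simp [pyStep, ha', hs]]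
            exact ih acc [] true ⟨hacc, rfl, fun _ => Or.inr ⟨rfl, haccne⟩, by simp⟩
        · have hpd := hc1 hcn; subst hpd
          have hce : cur.isEmpty = false := isEmpty_false_of_ne hcn
          rw [show (if cur.isEmpty = true
                then PySem.Chars.split₀.go (rest.flatMap altClean) [] acc
                else PySem.Chars.split₀.go (rest.flatMap altClean) [] (cur.reverse :: acc))
              = PySem.Chars.split₀.go (rest.flatMap altClean) [] (cur.reverse :: acc) by
            simp [hce]]
          have hone : OutOf acc cur false ≠ [] := by
            rw [outOf_ne acc cur false hcn]
            rw [show (if (false : Bool) = true then ['-'] else ([] : List Char)) = [] from rfl,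
              List.append_nil]
            refine ic_ne_nil _ (fun w hw => ?_) (by simp)
            rcases List.mem_append.mp hw with hw | hw
            · exact (hacc w (List.mem_reverse.mp hw)).1
            · simp only [List.mem_singleton] at hw
              subst hw
              simpa using hcn
          have hoe : (OutOf acc cur false).isEmpty = false := isEmpty_false_of_ne hone
          rw [show pyStep (OutOf acc cur false, false) c
                = (OutOf acc cur false ++ ['-'], true) by
            simp [pyStep, ha', hs, hoe]]
          rw [show OutOf acc cur false ++ ['-'] = OutOf (cur.reverse :: acc) [] true by
            rw [outOf_ne acc cur false hcn, outOf_nil_cur]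
            simp]
          refine ih (cur.reverse :: acc) [] true
            ⟨?_, rfl, fun _ => Or.inr ⟨rfl, by simp⟩, by simp⟩
          intro w hw
          rcases List.mem_cons.mp hw with rfl | hw
          · refine ⟨by simpa using hcn, ?_⟩
            rw [List.all_eq_true] at hcur ⊢
            intro x hx; exact hcur x (by simpa using hx)
          · exact hacc w hw
      · have hs' : (c == ' ' || c == '_' || c == '-') = false := by simpa using hs
        rw [show altClean c = [] by simp [altClean, ha', hs']]
        rw [show pyStep (OutOf acc cur pd, pd) c = (OutOf acc cur pd, pd) by
          simp [pyStep, ha', hs']]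
        simpa using ih acc cur pd hinv

-- fast path: an already-kebab-case slug is returned unchanged by B's pipeline
theorem fast_go (n : Nat) :
    ∀ raw : List Char, raw.length ≤ n →
      (∀ c ∈ raw, PySem.Chars.isalnum c = true ∨ c = '-') →
      ¬ ['-', '-'] <:+: raw → ¬ ['-'] <:+ raw →
      ∀ (cur : List Char) (acc : List (List Char)), cur ≠ [] →
        List.intercalate ['-'] (PySem.Chars.split₀.go (raw.flatMap altClean) cur acc)
          = List.intercalate ['-'] (acc.reverse ++ [cur.reverse]) ++ raw := by
  induction n with
  | zero =>
    intro raw hlen _ _ _ cur acc hcur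
    have : raw = [] := List.length_eq_zero_iff.mp (Nat.le_zero.mp hlen)
    subst this
    simp [PySem.Chars.split₀.go, isEmpty_false_of_ne hcur]
  | succ n ihn =>
    intro raw hlen hch hinf hsuf cur acc hcur
    cases raw with
    | nil => simp [PySem.Chars.split₀.go, isEmpty_false_of_ne hcur]
    | cons c rest =>
      rcases hch c (by simp) with hca | rfl
      · simp only [List.flatMap_cons, show altClean c = [c] by simp [altClean, hca]]
        rw [show PySem.Chars.split₀.go ([c] ++ rest.flatMap altClean) cur acc
              = PySem.Chars.split₀.go (rest.flatMap altClean) (c :: cur) acc by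
            simp [PySem.Chars.split₀.go, alnum_not_space c hca]]
        rw [ihn rest (by simpa using Nat.le_of_succ_le_succ hlen)
          (fun x hx => hch x (by simp [hx]))
          (fun h => hinf (List.infix_cons h))
          (fun h => hsuf (h.trans (List.suffix_cons c rest)))
          (c :: cur) acc (by simp)]
        rw [show (c :: cur).reverse = cur.reverse ++ [c] from by simp]
        rw [ic_snoc_char]
        simp
      · cases rest with
        | nil => exact absurd (List.suffix_refl ['-']) hsuf
        | cons d rest₂ =>
          have hd : d ≠ '-' := by
            intro hd; subst hd
            exact hinf (List.IsPrefix.isInfix ⟨rest₂, rfl⟩)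
          have hda : PySem.Chars.isalnum d = true :=
            (hch d (by simp)).resolve_right hd
          have hce : cur.isEmpty = false := isEmpty_false_of_ne hcur
          simp only [List.flatMap_cons,
            show altClean '-' = [' '] by simp [altClean, show PySem.Chars.isalnum '-' = false from by decide],
            show altClean d = [d] by simp [altClean, hda]]
          rw [show PySem.Chars.split₀.go (([' '] ++ ([d] ++ rest₂.flatMap altClean))) cur acc
                = PySem.Chars.split₀.go (rest₂.flatMap altClean) [d] (cur.reverse :: acc) by
              simp [PySem.Chars.split₀.go, hce, show PySem.Chars.isspace ' ' = true by decide,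
                alnum_not_space d hda]]
          rw [ihn rest₂ (by simp at hlen; omega)
            (fun x hx => hch x (by simp [hx]))
            (fun h => hinf (List.infix_cons (List.infix_cons h)))
            (fun h => hsuf ((h.trans (List.suffix_cons d rest₂)).trans
              (List.suffix_cons '-' (d :: rest₂))))
            [d] (cur.reverse :: acc) (by simp)]
          rw [show (cur.reverse :: acc).reverse = acc.reverse ++ [cur.reverse] from by simp]
          rw [show List.reverse [d] = [d] from rfl]
          rw [ic_concat ['-'] [d] (acc.reverse ++ [cur.reverse])]
          simp

theorem fast_path (raw : List Char) (hne : raw ≠ [])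
    (h1 : PySem.Chars.strIsalnum (PySem.Chars.replace raw ['-'] []) = true)
    (h2 : PySem.Chars.isIn ['-', '-'] raw = false)
    (h3 : PySem.Chars.startswith raw ['-'] = false)
    (h4 : PySem.Chars.endswith raw ['-'] = false) :
    List.intercalate ['-'] (PySem.Chars.split₀ (raw.flatMap altClean)) = raw := by
  rw [replace_dash] at h1
  simp only [PySem.Chars.strIsalnum, Bool.and_eq_true, List.all_eq_true] at h1
  have hch : ∀ x ∈ raw, PySem.Chars.isalnum x = true ∨ x = '-' := by
    intro x hx
    by_cases hxd : x = '-'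
    · exact Or.inr hxd
    · exact Or.inl (h1.2 x (List.mem_filter.mpr ⟨hx, by simp [hxd]⟩))
  have hinf : ¬ ['-', '-'] <:+: raw := by
    intro hi
    rw [(PySem.Chars.isIn_iff_infix ['-', '-'] raw).mpr hi] at h2
    exact absurd h2 (by simp)
  have hpre : ¬ ['-'] <+: raw := by
    intro hp
    rw [(PySem.Chars.startswith_iff raw ['-']).mpr hp] at h3
    exact absurd h3 (by simp)
  have hsuf : ¬ ['-'] <:+ raw := by
    intro hp
    rw [(PySem.Chars.endswith_iff raw ['-']).mpr hp] at h4
    exact absurd h4 (by simp)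
  cases raw with
  | nil => exact absurd rfl hne
  | cons c rest =>
    have hc : c ≠ '-' := by
      intro hc; subst hc
      exact hpre ⟨rest, rfl⟩
    have hca : PySem.Chars.isalnum c = true := (hch c (by simp)).resolve_right hc
    show List.intercalate ['-']
      (PySem.Chars.split₀.go ((c :: rest).flatMap altClean) [] []) = _
    simp only [List.flatMap_cons, show altClean c = [c] by simp [altClean, hca]]
    rw [show PySem.Chars.split₀.go ([c] ++ rest.flatMap altClean) [] []
          = PySem.Chars.split₀.go (rest.flatMap altClean) [c] [] by
        simp [PySem.Chars.split₀.go, alnum_not_space c hca]]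
    rw [fast_go rest.length rest le_rfl
      (fun x hx => hch x (by simp [hx]))
      (fun h => hinf (List.infix_cons h))
      (fun h => hsuf (h.trans (List.suffix_cons c rest)))
      [c] [] (by simp)]
    simp [ic_single]

-- the two normalizers agree
theorem norm_eq (s : String) : pyNormalizeLayerSlug s = altNormalizeLayerSlug s := by
  simp only [pyNormalizeLayerSlug, altNormalizeLayerSlug, PySem.Chars.join]
  generalize PySem.Chars.lower (PySem.Chars.strip s.toList) = raw
  by_cases h0 : raw.isEmpty = true
  · have : raw = [] := List.isEmpty_iff.mp h0
    subst this
    decide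
  · have hne : raw ≠ [] := fun h => h0 (by simp [h])
    rw [if_neg h0]
    by_cases h1 : (PySem.Chars.strIsalnum (PySem.Chars.replace raw ['-'] [])
        && !PySem.Chars.isIn ['-', '-'] raw
        && !PySem.Chars.startswith raw ['-']
        && !PySem.Chars.endswith raw ['-']) = true
    · rw [if_pos h1]
      simp only [Bool.and_eq_true, Bool.not_eq_true'] at h1
      obtain ⟨⟨⟨ha, hb⟩, hc⟩, hd⟩ := h1
      rw [fast_path raw hne ha hb hc hd]
    · rw [if_neg h1]
      congr 1
      have hmain := main_loop raw [] [] false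
        ⟨fun w hw => by simp at hw, rfl, fun _ => Or.inl ⟨rfl, rfl⟩, by simp⟩
      rw [show OutOf [] [] false = [] by simp [OutOf, ic_nil]] at hmain
      rw [hmain]
      rfl

-- set plumbing: skipping "" while adding = adding everything, then discarding ""
theorem discard_add (s : PySem.Set String) (y : String) :
    PySem.Set.discard (PySem.Set.add s y) ""
      = if y == "" then PySem.Set.discard s ""
        else PySem.Set.add (PySem.Set.discard s "") y := by
  simp only [PySem.Set.discard, PySem.Set.add, PySem.Set.contains]
  by_cases hy : y = ""
  · subst hy
    by_cases hm : ("" : String) ∈ s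
    · simp [hm]
    · simp [hm, List.filter_append]
  · by_cases hm : y ∈ s
    · simp [hm, hy]
    · simp [hm, hy, List.filter_append]

theorem fold_skip_eq_discard (f : String → String) (l : List String) :
    ∀ acc : PySem.Set String,
      l.foldl (fun s t => if f t == "" then s else PySem.Set.add s (f t))
          (PySem.Set.discard acc "")
        = PySem.Set.discard (l.foldl (fun s t => PySem.Set.add s (f t)) acc) "" := by
  induction l with
  | nil => intro acc; simp
  | cons t l ih =>
    intro acc
    simp only [List.foldl_cons]
    rw [← discard_add acc (f t)]
    exact ih (PySem.Set.add acc (f t))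

-- ===== VERDICT (by name: the statement is the Claim_ definition above) =====
theorem extract_layer_slugs_from_tags_spec : Claim_equal_extract_layer_slugs_from_tags := by
  intro tags _hdom
  unfold Spec_extract_layer_slugs_from_tags
  unfold extract_layer_slugs_from_tags extract_layer_slugs_from_tags_alt
  have hfun : (fun (out : PySem.Set String) (t : String) =>
      let raw := PySem.Chars.strip t.toList
      if raw.isEmpty then out
      else if !PySem.Chars.startswith (PySem.Chars.lower raw) ['l', 'a', 'y', 'e', 'r', ':']
        then out
      else
        let tail := PySem.Chars.strip ((PySem.Chars.splitOnMax raw [':'] 1).getD 1 [])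
        let slug := pyNormalizeLayerSlug (String.ofList tail)
        if slug == "" then out else PySem.Set.add out slug)
      = (fun (out : PySem.Set String) (t : String) =>
        if PySem.Chars.startswith (PySem.Chars.lower (PySem.Chars.strip t.toList))
            ['l', 'a', 'y', 'e', 'r', ':'] then
          (if altNormalizeLayerSlug (String.ofList (PySem.Chars.strip
                ((PySem.Chars.splitOnMax (PySem.Chars.strip t.toList) [':'] 1).getD 1 []))) == ""
           then out
           else PySem.Set.add out (altNormalizeLayerSlug (String.ofList (PySem.Chars.strip
                ((PySem.Chars.splitOnMax (PySem.Chars.strip t.toList) [':'] 1).getD 1 [])))))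
        else out) := by
    funext out t
    by_cases he : (PySem.Chars.strip t.toList).isEmpty = true
    · have hnil : PySem.Chars.strip t.toList = [] := List.isEmpty_iff.mp he
      have hP : PySem.Chars.startswith (PySem.Chars.lower (PySem.Chars.strip t.toList))
          ['l', 'a', 'y', 'e', 'r', ':'] = false := by
        rw [hnil]; decide
      simp [he, hP]
    · simp only [he, Bool.false_eq_true, if_neg, not_false_iff]
      by_cases hq : PySem.Chars.startswith (PySem.Chars.lower (PySem.Chars.strip t.toList))
          ['l', 'a', 'y', 'e', 'r', ':'] = true
      · simp [hq, norm_eq]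
      · simp [hq]
  rw [hfun]
  rw [PySem.List.foldl_if_eq_foldl_filter
    (fun t => PySem.Chars.startswith (PySem.Chars.lower (PySem.Chars.strip t.toList))
      ['l', 'a', 'y', 'e', 'r', ':'])
    (fun (out : PySem.Set String) t =>
      if altNormalizeLayerSlug (String.ofList (PySem.Chars.strip
            ((PySem.Chars.splitOnMax (PySem.Chars.strip t.toList) [':'] 1).getD 1 []))) == ""
       then out
       else PySem.Set.add out (altNormalizeLayerSlug (String.ofList (PySem.Chars.strip
            ((PySem.Chars.splitOnMax (PySem.Chars.strip t.toList) [':'] 1).getD 1 [])))))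
    tags []]
  have h := fold_skip_eq_discard
    (fun t => altNormalizeLayerSlug (String.ofList (PySem.Chars.strip
      ((PySem.Chars.splitOnMax (PySem.Chars.strip t.toList) [':'] 1).getD 1 []))))
    (tags.filter (fun t =>
      PySem.Chars.startswith (PySem.Chars.lower (PySem.Chars.strip t.toList))
        ['l', 'a', 'y', 'e', 'r', ':'])) []
  simp only [show PySem.Set.discard ([] : PySem.Set String) "" = [] from rfl] at h
  rw [h]
  rw [PySem.Set.ofList_eq_foldl, List.foldl_map]
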